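-- pv_equiv track=rewrite | github.com/DOUCE-LLC/eq | extra/Ejercicio_N1.py | mayor_diferencia2
-- ===== SOURCE A (Python) =====
-- def mayor_diferencia2(lst):
--     '''Devuelve la mayor diferencia entre la lista
--
--     Args:
--         lst (list): Lista que contiene números
--
--     Returns:
--         max_diff (int): Maxima diferencia hayada
--     '''
--
--     max_diff = 0                                    # inicializamos la mayor diferencia como 0
--     min_num = lst[0]                                # inicializamos el valor mínimo con el primer número de la lista
--
--     for num in lst[1:]:                             # iteramos a través de los números de la lista, comenzando desde el segundo número
--         diff = num - min_num                        # calculamos la diferencia con el valor mínimo actual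
--
--         if diff > max_diff:                         # Si la diferencia calculada es mayor que la mayor diferencia actual, actualizamos max_diff
--             max_diff = diff
--
--         if num < min_num:                           # Si el número actual es menor que el valor mínimo actual, actualizamos min_num
--             min_num = num
--
--     return max_diff                                 # Devolvemos la mayor diferencia
-- ===== SOURCE B (Python) =====
-- def _dc(seg):
--     """Return (minimum, maximum, best difference) of a nonempty segment."""
--     if len(seg) == 1:
--         x = seg[0]
--         return (x, x, 0)
--     m = len(seg) // 2
--     lmin, lmax, lbest = _dc(seg[:m])
--     rmin, rmax, rbest = _dc(seg[m:])
--     return (min(lmin, rmin), max(lmax, rmax), max(lbest, rbest, rmax - lmin))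
--
--
-- def mayor_diferencia2(lst):
--     """Divide and conquer: split the list in halves; the best difference is
--     the best within each half or (max of right half) - (min of left half)."""
--     return _dc(lst)[2]
-- ===== Notes on version B (the rewrite author's own statement) =====
-- stated objective: alternative
-- what changed: B replaces A's single left-to-right scan with a running minimum by a divide-and-conquer recursion: each half returns a (min, max, best) triple and halves are combined with max(lbest, rbest, rmax - lmin).
import Mathlib
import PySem

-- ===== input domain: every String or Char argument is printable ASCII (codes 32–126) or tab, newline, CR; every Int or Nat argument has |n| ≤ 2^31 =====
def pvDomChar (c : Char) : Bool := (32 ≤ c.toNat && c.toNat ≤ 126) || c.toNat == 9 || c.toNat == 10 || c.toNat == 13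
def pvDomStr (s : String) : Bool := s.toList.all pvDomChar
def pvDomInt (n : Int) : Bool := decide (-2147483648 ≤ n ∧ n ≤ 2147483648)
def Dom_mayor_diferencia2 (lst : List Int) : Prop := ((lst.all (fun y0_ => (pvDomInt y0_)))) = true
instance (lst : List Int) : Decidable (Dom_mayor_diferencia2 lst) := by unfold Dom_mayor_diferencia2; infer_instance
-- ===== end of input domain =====

-- B replaces A's single scan with a running minimum by a divide-and-conquer
-- recursion combining (min, max, best) triples of the two halves; same result.

-- ===== PORT A =====
-- the loop 'for num in lst[1:]' with state (max_diff, min_num)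
def goA (md mn : Int) : List Int → Int
  | [] => md
  | n :: t => goA (if n - mn > md then n - mn else md) (if n < mn then n else mn) t

def mayor_diferencia2 (lst : List Int) : Int :=
  match lst with
  | [] => 0          -- unreachable under Pre_: Python raises IndexError on lst[0]
  | h :: t => goA 0 h t

-- ===== PORT B =====
-- _dc(seg): (minimum, maximum, best difference) of a nonempty segment
def dcB (l : List Int) : Int × Int × Int :=
  match l with
  | [] => (0, 0, 0)  -- unreachable under Pre_: Python recurses forever on []
  | [x] => (x, x, 0)
  | a :: b :: t =>
    let m := (a :: b :: t).length / 2
    let L := dcB ((a :: b :: t).take m)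
    let R := dcB ((a :: b :: t).drop m)
    (min L.1 R.1, max L.2.1 R.2.1, max (max L.2.2 R.2.2) (R.2.1 - L.1))
termination_by l.length
decreasing_by
  · simp [List.length_take]; omega
  · simp; omega

def mayor_diferencia2_alt (lst : List Int) : Int := (dcB lst).2.2

-- ===== PRECONDITION & SPEC =====
-- Pre_ excludes only the empty list, on which both A and B raise.
def Pre_mayor_diferencia2 (lst : List Int) : Prop := lst ≠ []
instance (lst : List Int) : Decidable (Pre_mayor_diferencia2 lst) := by unfold Pre_mayor_diferencia2; infer_instance
def pvWitness_mayor_diferencia2 : List Int := [3, 1, 4]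

def Spec_mayor_diferencia2 (lst : List Int) (out : Int) : Prop := out = mayor_diferencia2_alt lst
instance (lst : List Int) (out : Int) : Decidable (Spec_mayor_diferencia2 lst out) := by unfold Spec_mayor_diferencia2; infer_instance

-- ===== CLAIM (what is proved, stated in full; the proofs are below) =====
def Claim_equal_mayor_diferencia2 : Prop := ∀ (lst : List Int), Dom_mayor_diferencia2 lst → Pre_mayor_diferencia2 lst → Spec_mayor_diferencia2 lst (mayor_diferencia2 lst)

-- ===== LEMMAS AND PROOFS =====

-- all pairwise differences lst[j] - lst[i] for i < j
def allDiffs : List Int → List Int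
  | [] => []
  | h :: t => t.map (· - h) ++ allDiffs t

def Dmax (l : List Int) (s : Int) : Int := (allDiffs l).foldl max s
def lmin : List Int → Int
  | [] => 0
  | h :: t => t.foldl min h
def lmax : List Int → Int
  | [] => 0
  | h :: t => t.foldl max h

theorem foldl_max_init (l : List Int) : ∀ x y : Int, l.foldl max (max x y) = max x (l.foldl max y) := by
  induction l with
  | nil => intro x y; rfl
  | cons h t ih =>
    intro x y
    have : max (max x y) h = max x (max y h) := by omega
    simp only [List.foldl_cons, this, ih]

theorem foldl_min_init (l : List Int) : ∀ x y : Int, l.foldl min (min x y) = min x (l.foldl min y) := by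
  induction l with
  | nil => intro x y; rfl
  | cons h t ih =>
    intro x y
    have : min (min x y) h = min x (min y h) := by omega
    simp only [List.foldl_cons, this, ih]

theorem le_foldl_max (l : List Int) : ∀ s : Int, s ≤ l.foldl max s := by
  induction l with
  | nil => intro s; simp
  | cons h t ih =>
    intro s
    calc s ≤ max s h := le_max_left _ _
    _ ≤ t.foldl max (max s h) := ih _
    _ = (h :: t).foldl max s := rfl

theorem fmax_map_sub_shift (R : List Int) : ∀ s a : Int,
    (R.map (· - a)).foldl max s = (R.foldl max (s + a)) - a := by
  induction R with
  | nil => intro s a; simp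
  | cons b R' ih =>
    intro s a
    have : max s (b - a) + a = max (s + a) b := by omega
    simp only [List.map_cons, List.foldl_cons, ih, this]

theorem fmax_map_sub (R : List Int) (hR : R ≠ []) (s a : Int) :
    (R.map (· - a)).foldl max s = max s (lmax R - a) := by
  match R with
  | b :: R' =>
    rw [fmax_map_sub_shift]
    show (R'.foldl max (max (s + a) b)) - a = max s (lmax (b :: R') - a)
    rw [foldl_max_init]
    show max (s + a) (lmax (b :: R')) - a = _
    omega

theorem Dmax_cons (h : Int) (t : List Int) (s : Int) :
    Dmax (h :: t) s = Dmax t ((t.map (· - h)).foldl max s) := by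
  simp [Dmax, allDiffs, List.foldl_append]

theorem le_Dmax (l : List Int) (s : Int) : s ≤ Dmax l s := le_foldl_max _ _

theorem Dmax_init (l : List Int) (s : Int) (hs : 0 ≤ s) : Dmax l s = max s (Dmax l 0) := by
  have h := foldl_max_init (allDiffs l) s 0
  have hs0 : max s 0 = s := by omega
  rw [hs0] at h
  simpa [Dmax] using h

theorem lmin_cons (h : Int) (t : List Int) (ht : t ≠ []) :
    lmin (h :: t) = min h (lmin t) := by
  match t with
  | a :: t' =>
    show (a :: t').foldl min h = _
    have : h = min h a ∨ (a::t').foldl min h = t'.foldl min (min h a) := Or.inr rfl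
    show t'.foldl min (min h a) = min h (t'.foldl min a)
    exact foldl_min_init _ _ _

theorem lmin_append (L R : List Int) (hL : L ≠ []) (hR : R ≠ []) :
    lmin (L ++ R) = min (lmin L) (lmin R) := by
  match L, R with
  | h :: t, b :: R' =>
    show (t ++ b :: R').foldl min h = _
    rw [List.foldl_append]
    show (b :: R').foldl min (t.foldl min h) = min (lmin (h :: t)) (lmin (b :: R'))
    show R'.foldl min (min (t.foldl min h) b) = _
    rw [foldl_min_init]; rfl

theorem lmax_append (L R : List Int) (hL : L ≠ []) (hR : R ≠ []) :
    lmax (L ++ R) = max (lmax L) (lmax R) := by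
  match L, R with
  | h :: t, b :: R' =>
    show (t ++ b :: R').foldl max h = _
    rw [List.foldl_append]
    show R'.foldl max (max (t.foldl max h) b) = _
    rw [foldl_max_init]; rfl

theorem Dmax_append (R : List Int) (hR : R ≠ []) : ∀ (L : List Int), L ≠ [] → ∀ s : Int, 0 ≤ s →
    Dmax (L ++ R) s = max (Dmax L s) (max (Dmax R 0) (lmax R - lmin L)) := by
  intro L
  induction L with
  | nil => intro h; exact absurd rfl h
  | cons h t ih =>
    intro _ s hs
    by_cases ht : t = []
    · subst ht
      have : ([h] : List Int) ++ R = h :: R := rfl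
      rw [this, Dmax_cons, fmax_map_sub R hR, Dmax_init R _ (by omega)]
      show _ = max (Dmax [h] s) _
      have hD : Dmax [h] s = s := by simp [Dmax, allDiffs]
      rw [hD]
      show max (max s (lmax R - h)) (Dmax R 0) = _
      have hlm : lmin [h] = h := rfl
      rw [hlm]; omega
    · have hcons : (h :: t) ++ R = h :: (t ++ R) := rfl
      rw [hcons, Dmax_cons]
      have hmap : (t ++ R).map (· - h) = t.map (· - h) ++ R.map (· - h) := List.map_append ..
      rw [hmap, List.foldl_append]
      set s2 := (t.map (· - h)).foldl max s with hs2
      have hs2n : 0 ≤ s2 := le_trans hs (le_foldl_max _ _)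
      rw [fmax_map_sub R hR]
      have hs1n : (0:Int) ≤ max s2 (lmax R - h) := by omega
      rw [ih ht _ hs1n]
      have hDt : Dmax t (max s2 (lmax R - h)) = max (lmax R - h) (Dmax t s2) := by
        have hc : max s2 (lmax R - h) = max (lmax R - h) s2 := max_comm _ _
        rw [Dmax, hc, foldl_max_init]; rfl
      rw [hDt]
      have hAcons : Dmax (h :: t) s = Dmax t s2 := Dmax_cons h t s
      rw [hAcons, lmin_cons h t ht]
      have h1 : Dmax t s2 ≥ s2 := le_Dmax _ _
      omega

theorem dcB_eq (l : List Int) (h : 2 ≤ l.length) :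
    dcB l =
      (min (dcB (l.take (l.length / 2))).1 (dcB (l.drop (l.length / 2))).1,
       max (dcB (l.take (l.length / 2))).2.1 (dcB (l.drop (l.length / 2))).2.1,
       max (max (dcB (l.take (l.length / 2))).2.2 (dcB (l.drop (l.length / 2))).2.2)
           ((dcB (l.drop (l.length / 2))).2.1 - (dcB (l.take (l.length / 2))).1)) := by
  match l with
  | a :: b :: t => rw [dcB]

theorem Dmax_single (x : Int) : Dmax [x] 0 = 0 := by simp [Dmax, allDiffs]

theorem dcB_spec : ∀ n (l : List Int), l.length ≤ n → l ≠ [] →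
    dcB l = (lmin l, lmax l, Dmax l 0) := by
  intro n
  induction n with
  | zero => intro l hl hne; cases l with
    | nil => exact absurd rfl hne
    | cons a t => simp at hl
  | succ n ih =>
    intro l hl hne
    match l, hne with
    | [x], _ => simp [dcB, lmin, lmax, Dmax_single]
    | a :: b :: t, _ =>
      set l := a :: b :: t with hldef
      have hlen : 2 ≤ l.length := by simp [hldef]
      set m := l.length / 2 with hm
      have hm1 : 1 ≤ m := by omega
      have hmlt : m < l.length := by omega
      have hLlen : (l.take m).length = m := by
        rw [List.length_take]; omega
      have hRlen : (l.drop m).length = l.length - m := by simp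
      have hLne : l.take m ≠ [] := by
        intro hc; rw [hc] at hLlen; simp at hLlen; omega
      have hRne : l.drop m ≠ [] := by
        intro hc; rw [hc] at hRlen; simp at hRlen; omega
      have hL := ih (l.take m) (by omega) hLne
      have hR := ih (l.drop m) (by rw [hRlen]; omega) hRne
      rw [dcB_eq l hlen, hL, hR]
      have hsplit : l.take m ++ l.drop m = l := List.take_append_drop _ _
      have e1 : lmin l = min (lmin (l.take m)) (lmin (l.drop m)) := by
        conv_lhs => rw [← hsplit]
        exact lmin_append _ _ hLne hRne
      have e2 : lmax l = max (lmax (l.take m)) (lmax (l.drop m)) := by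
        conv_lhs => rw [← hsplit]
        exact lmax_append _ _ hLne hRne
      have e3 : Dmax l 0 = max (Dmax (l.take m) 0)
          (max (Dmax (l.drop m) 0) (lmax (l.drop m) - lmin (l.take m))) := by
        conv_lhs => rw [← hsplit]
        exact Dmax_append _ hRne _ hLne 0 le_rfl
      have hD1 : (0:Int) ≤ Dmax (l.take m) 0 := le_Dmax _ _
      have hD2 : (0:Int) ≤ Dmax (l.drop m) 0 := le_Dmax _ _
      refine Prod.ext ?_ (Prod.ext ?_ ?_) <;> simp only [e1, e2, e3] <;> try omega

theorem foldl_max_two_maps (t : List Int) : ∀ (r : List Int) (s a b : Int),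
    List.foldl max s (t.map (· - a) ++ t.map (· - b) ++ r)
      = List.foldl max s (t.map (· - min a b) ++ r) := by
  induction t with
  | nil => intro r s a b; simp
  | cons x t' ih =>
    intro r s a b
    have hperm : (t'.map (· - a) ++ (x - b) :: (t'.map (· - b) ++ r)).Perm
        ((x - b) :: (t'.map (· - a) ++ (t'.map (· - b) ++ r))) := List.perm_middle
    calc List.foldl max s ((x::t').map (· - a) ++ (x::t').map (· - b) ++ r)
        = List.foldl max (max s (x - a)) (t'.map (· - a) ++ (x - b) :: (t'.map (· - b) ++ r)) := by
          simp [List.foldl_append]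
      _ = List.foldl max (max s (x - a)) ((x - b) :: (t'.map (· - a) ++ (t'.map (· - b) ++ r))) :=
          List.Perm.foldl_op_eq hperm
      _ = List.foldl max (max (max s (x - a)) (x - b)) (t'.map (· - a) ++ t'.map (· - b) ++ r) := by
          simp [List.append_assoc]
      _ = List.foldl max (max (max s (x - a)) (x - b)) (t'.map (· - min a b) ++ r) := ih r _ a b
      _ = List.foldl max s ((x::t').map (· - min a b) ++ r) := by
          have h : max (max s (x - a)) (x - b) = max s (x - min a b) := by omega
          simp [h]

theorem goA_eq (l : List Int) : ∀ md mn, goA md mn l = Dmax (mn :: l) md := by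
  induction l with
  | nil => intro md mn; simp [goA, Dmax, allDiffs]
  | cons n t ih =>
    intro md mn
    calc goA md mn (n :: t)
        = goA (max md (n - mn)) (min mn n) t := by
          show goA (if n - mn > md then n - mn else md) (if n < mn then n else mn) t = _
          have h1 : (if n - mn > md then n - mn else md) = max md (n - mn) := by omega
          have h2 : (if n < mn then n else mn) = min mn n := by omega
          rw [h1, h2]
      _ = List.foldl max (max md (n - mn)) (t.map (· - min mn n) ++ allDiffs t) := by
          rw [ih]; rfl
      _ = List.foldl max (max md (n - mn)) (t.map (· - mn) ++ t.map (· - n) ++ allDiffs t) :=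
          (foldl_max_two_maps t (allDiffs t) _ mn n).symm
      _ = Dmax (mn :: n :: t) md := by
          simp [Dmax, allDiffs, List.foldl_append, List.append_assoc]

-- ===== VERDICT (by name: the statement is the Claim_ definition above) =====
theorem mayor_diferencia2_spec : Claim_equal_mayor_diferencia2 := by
  intro lst _ hpre
  unfold Spec_mayor_diferencia2
  match lst, hpre with
  | h :: t, _ =>
    rw [mayor_diferencia2_alt, dcB_spec (h :: t).length (h :: t) le_rfl (by simp)]
    show goA 0 h t = Dmax (h :: t) 0
    exact goA_eq t 0 h
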